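-- pv_equiv track=rewrite | github.com/evergreen-helix/spotgraph | backend/ingest/scrape_osm.py | derive_vibe
-- ===== SOURCE A (Python) =====
-- def derive_vibe(tags: dict, amenity: str) -> list[str]:
--     v: list[str] = []
--     if amenity == "cafe":      v.extend(["cafe", "bright"])
--     if amenity == "fast_food": v.extend(["counter_service", "cheap_eats", "takeaway"])
--     if amenity == "pub":       v.extend(["pub"])
--     if amenity == "bar":       v.extend(["loud", "atmospheric"])
--     if amenity == "food_court":v.extend(["bustling", "counter_service"])
--     if amenity == "ice_cream": v.append("counter_service")
--
--     if tags.get("outdoor_seating") in ("yes", "seasonal"): v.append("outdoor")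
--     if tags.get("takeaway") == "yes":                      v.append("takeaway")
--     if tags.get("delivery") == "yes":                      v.append("delivery")
--     if tags.get("internet_access") in ("wlan", "yes"):     v.append("design_y")
--     if tags.get("smoking") in ("outside", "no"):           pass
--     if tags.get("reservation") in ("no", "not_required"):  v.append("no_frills")
--     if tags.get("organic") == "yes":                       v.append("local_favourite")
--
--     oh = (tags.get("opening_hours") or "").lower()
--     if "24/7" in oh or "03:" in oh or "04:" in oh:         v.append("late_night")
--
--     # Dedupe, cap at 5
--     seen: set[str] = set()
--     out: list[str] = []
--     for vb in v:
--         if vb in seen: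
--             continue
--         seen.add(vb)
--         out.append(vb)
--     return out[:5]
-- ===== SOURCE B (Python) =====
-- # One unified rule engine: the amenity becomes a virtual "@amenity" tag, a single
-- # rule table drives a flattening comprehension, and an explicitly recursive
-- # consumer dedups while capping at 5 with early termination (no seen-set, no slice).
-- _RULES = [
--     ("@amenity", ("cafe",), ("cafe", "bright")),
--     ("@amenity", ("fast_food",), ("counter_service", "cheap_eats", "takeaway")),
--     ("@amenity", ("pub",), ("pub",)),
--     ("@amenity", ("bar",), ("loud", "atmospheric")),
--     ("@amenity", ("food_court",), ("bustling", "counter_service")),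
--     ("@amenity", ("ice_cream",), ("counter_service",)),
--     ("outdoor_seating", ("yes", "seasonal"), ("outdoor",)),
--     ("takeaway", ("yes",), ("takeaway",)),
--     ("delivery", ("yes",), ("delivery",)),
--     ("internet_access", ("wlan", "yes"), ("design_y",)),
--     ("reservation", ("no", "not_required"), ("no_frills",)),
--     ("organic", ("yes",), ("local_favourite",)),
-- ]
--
--
-- def _pick(cands, out):
--     # recursive dedup-and-cap: stop as soon as 5 distinct tags are collected
--     if len(out) == 5 or not cands:
--         return out
--     head = cands[0]
--     return _pick(cands[1:], out if head in out else out + [head])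
--
--
-- def derive_vibe(tags: dict, amenity: str) -> list[str]:
--     look = {**tags, "@amenity": amenity}
--     cands = [t for key, ok, emits in _RULES if look.get(key) in ok for t in emits]
--     oh = (tags.get("opening_hours") or "").lower()
--     if any(m in oh for m in ("24/7", "03:", "04:")):
--         cands.append("late_night")
--     return _pick(cands, [])
-- ===== Notes on version B (the rewrite author's own statement) =====
-- stated objective: alternative
-- what changed: B unifies the amenity cascade and the per-tag ifs into one rule engine (the amenity is injected as a virtual "@amenity" tag and a single table drives a flattening comprehension) and replaces A's build-all/seen-set-dedup/slice pipeline with a recursive consumer that dedups by membership in the output and stops early once 5 distinct tags are collected.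
import Mathlib
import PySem

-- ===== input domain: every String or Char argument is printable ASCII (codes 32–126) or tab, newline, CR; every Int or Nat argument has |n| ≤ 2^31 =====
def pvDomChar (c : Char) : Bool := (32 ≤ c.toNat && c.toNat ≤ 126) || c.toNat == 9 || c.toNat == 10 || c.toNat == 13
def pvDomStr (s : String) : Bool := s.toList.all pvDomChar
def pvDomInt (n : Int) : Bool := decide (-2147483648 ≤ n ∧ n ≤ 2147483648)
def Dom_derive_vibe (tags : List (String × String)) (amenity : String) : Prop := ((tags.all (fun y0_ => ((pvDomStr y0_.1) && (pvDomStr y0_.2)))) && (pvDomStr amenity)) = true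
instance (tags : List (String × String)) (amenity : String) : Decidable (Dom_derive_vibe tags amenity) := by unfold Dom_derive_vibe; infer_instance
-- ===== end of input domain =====

-- B folds the amenity cascade and the tag ifs into one rule engine over a virtual "@amenity" tag, and
-- dedups-and-caps at 5 by a recursive early-stopping consumer (alternative decomposition, same cost).

-- ===== PORT A =====
def derive_vibe (tags : List (String × String)) (amenity : String) : List String :=
  let t := PySem.Dict.mk tags
  let v : List String := []
  let v := if amenity == "cafe" then v ++ ["cafe", "bright"] else v
  let v := if amenity == "fast_food" then v ++ ["counter_service", "cheap_eats", "takeaway"] else v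
  let v := if amenity == "pub" then v ++ ["pub"] else v
  let v := if amenity == "bar" then v ++ ["loud", "atmospheric"] else v
  let v := if amenity == "food_court" then v ++ ["bustling", "counter_service"] else v
  let v := if amenity == "ice_cream" then v ++ ["counter_service"] else v
  let v := if t.get? "outdoor_seating" == some "yes" || t.get? "outdoor_seating" == some "seasonal" then v ++ ["outdoor"] else v
  let v := if t.get? "takeaway" == some "yes" then v ++ ["takeaway"] else v
  let v := if t.get? "delivery" == some "yes" then v ++ ["delivery"] else v
  let v := if t.get? "internet_access" == some "wlan" || t.get? "internet_access" == some "yes" then v ++ ["design_y"] else v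
  -- the smoking branch's body is 'pass': no effect on v
  let v := if t.get? "reservation" == some "no" || t.get? "reservation" == some "not_required" then v ++ ["no_frills"] else v
  let v := if t.get? "organic" == some "yes" then v ++ ["local_favourite"] else v
  -- (tags.get("opening_hours") or ""): '' is as falsy as None, so this is exactly getD with default ""
  let oh := PySem.Str.lower (t.getD "opening_hours" "")
  let v := if PySem.Str.isIn "24/7" oh || PySem.Str.isIn "03:" oh || PySem.Str.isIn "04:" oh then v ++ ["late_night"] else v
  let p := v.foldl (fun (p : PySem.Set String × List String) vb =>
      if PySem.Set.contains p.1 vb then p else (PySem.Set.add p.1 vb, p.2 ++ [vb]))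
    ((PySem.Set.empty : PySem.Set String), ([] : List String))
  -- out[:5] with a nonnegative literal bound is exactly take 5
  p.2.take 5

-- ===== PORT B =====
-- the unified rule table: (key, accepted values, emitted tags); the amenity is the virtual tag "@amenity"
def pvRules : List (String × List String × List String) :=
  [("@amenity", ["cafe"], ["cafe", "bright"]),
   ("@amenity", ["fast_food"], ["counter_service", "cheap_eats", "takeaway"]),
   ("@amenity", ["pub"], ["pub"]),
   ("@amenity", ["bar"], ["loud", "atmospheric"]),
   ("@amenity", ["food_court"], ["bustling", "counter_service"]),
   ("@amenity", ["ice_cream"], ["counter_service"]),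
   ("outdoor_seating", ["yes", "seasonal"], ["outdoor"]),
   ("takeaway", ["yes"], ["takeaway"]),
   ("delivery", ["yes"], ["delivery"]),
   ("internet_access", ["wlan", "yes"], ["design_y"]),
   ("reservation", ["no", "not_required"], ["no_frills"]),
   ("organic", ["yes"], ["local_favourite"])]

-- recursive dedup-and-cap: stop as soon as 5 distinct tags are collected (Source B's _pick)
def pvPick (cands out : List String) : List String :=
  if out.length == 5 || cands.isEmpty then out
  else
    match cands with
    | [] => out
    | head :: rest => pvPick rest (if out.contains head then out else out ++ [head])
termination_by cands.length
decreasing_by simp_all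

def derive_vibe_alt (tags : List (String × String)) (amenity : String) : List String :=
  -- {**tags, "@amenity": amenity}
  let look := (PySem.Dict.mk tags).insert "@amenity" amenity
  -- [t for key, ok, emits in _RULES if look.get(key) in ok for t in emits]
  let cands := pvRules.flatMap (fun r => if (look.get? r.1).any (fun s => r.2.1.contains s) then r.2.2 else [])
  let oh := PySem.Str.lower ((PySem.Dict.mk tags).getD "opening_hours" "")
  let cands := if (["24/7", "03:", "04:"] : List String).any (fun m => PySem.Str.isIn m oh) then cands ++ ["late_night"] else cands
  pvPick cands []

-- ===== PRECONDITION & SPEC =====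
def Spec_derive_vibe (tags : List (String × String)) (amenity : String) (out : List String) : Prop := out = derive_vibe_alt tags amenity
instance (tags : List (String × String)) (amenity : String) (out : List String) : Decidable (Spec_derive_vibe tags amenity out) := by unfold Spec_derive_vibe; infer_instance

-- ===== CLAIM (what is proved, stated in full; the proofs are below) =====
def Claim_equal_derive_vibe : Prop := ∀ (tags : List (String × String)) (amenity : String), Dom_derive_vibe tags amenity → Spec_derive_vibe tags amenity (derive_vibe tags amenity)

-- ===== LEMMAS AND PROOFS =====

-- A's dedup loop: once seen and out coincide, they stay equal and both are the running PySem.Set.add fold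
lemma pv_loopA (v : List String) (s : List String) :
    v.foldl (fun (p : PySem.Set String × List String) vb =>
        if PySem.Set.contains p.1 vb then p else (PySem.Set.add p.1 vb, p.2 ++ [vb])) (s, s)
      = (v.foldl PySem.Set.add s, v.foldl PySem.Set.add s) := by
  induction v generalizing s with
  | nil => rfl
  | cons a v ih =>
    by_cases h : a ∈ s
    · have ha : PySem.Set.add s a = s := by simp [PySem.Set.add, PySem.Set.contains, h]
      simpa [List.foldl_cons, PySem.Set.contains, h, ha] using ih s
    · have ha : PySem.Set.add s a = s ++ [a] := by simp [PySem.Set.add, PySem.Set.contains, h]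
      simpa [List.foldl_cons, PySem.Set.contains, h, ha] using ih (s ++ [a])

-- the Set.add fold only appends to its start state
lemma pv_fold_prefix (l : List String) (s : List String) :
    ∃ ext, l.foldl PySem.Set.add s = s ++ ext := by
  induction l generalizing s with
  | nil => exact ⟨[], by simp⟩
  | cons a l ih =>
    by_cases h : a ∈ s
    · have : PySem.Set.add s a = s := by simp [PySem.Set.add, PySem.Set.contains, h]
      simpa [this] using ih s
    · have ha : PySem.Set.add s a = s ++ [a] := by simp [PySem.Set.add, PySem.Set.contains, h]
      obtain ⟨ext, he⟩ := ih (s ++ [a])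
      exact ⟨[a] ++ ext, by simp [ha, he]⟩

-- B's recursive consumer computes the first-5 truncation of A's dedup fold
lemma pv_pick_eq (cands out : List String) (h : out.length ≤ 5) :
    pvPick cands out = (cands.foldl PySem.Set.add out).take 5 := by
  induction cands generalizing out with
  | nil =>
    rw [pvPick]
    simp only [List.isEmpty_nil, Bool.or_true, if_true, List.foldl_nil]
    exact (List.take_of_length_le h).symm
  | cons a l ih =>
    rw [pvPick]
    by_cases h5 : out.length = 5
    · obtain ⟨ext, he⟩ := pv_fold_prefix (a :: l) out
      have hcond : (out.length == 5 || (a :: l).isEmpty) = true := by simp [h5]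
      rw [hcond]
      simp only [if_true]
      rw [he, show (5 : Nat) = out.length from h5.symm]
      exact List.take_left.symm
    · have hadd : (if out.contains a then out else out ++ [a]) = PySem.Set.add out a := by
        simp [PySem.Set.add, PySem.Set.contains]
      have hlen : (PySem.Set.add out a).length ≤ 5 := by
        by_cases hm : a ∈ out
        · simpa [PySem.Set.add, PySem.Set.contains, hm] using h
        · simp [PySem.Set.add, PySem.Set.contains, hm]; omega
      have hc : (out.length == 5 || (a :: l).isEmpty) = false := by simp [h5]
      rw [hc]
      simp only [Bool.false_eq_true, if_false]
      rw [hadd, ih _ hlen, List.foldl_cons]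

lemma pv_any_two (o : Option String) (a b : String) :
    o.any (fun s => ([a, b] : List String).contains s) = (o == some a || o == some b) := by
  cases o with
  | none => rfl
  | some s => simp [← Bool.beq_eq_decide_eq]

lemma pv_any_beq (o : Option String) (a : String) :
    o.any (fun s => s == a) = (o == some a) := by
  cases o <;> simp

lemma pv_contains_one (a x : String) : ([a] : List String).contains x = (x == a) := by
  simp [← Bool.beq_eq_decide_eq]

lemma pv_if_append (c : Prop) [Decidable c] (v l : List String) :
    (if c then v ++ l else v) = v ++ (if c then l else []) := by
  split <;> simp

-- ===== VERDICT (by name: the statement is the Claim_ definition above) =====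
theorem derive_vibe_spec : Claim_equal_derive_vibe := by
  intro tags amenity _
  show derive_vibe tags amenity = derive_vibe_alt tags amenity
  simp only [derive_vibe, derive_vibe_alt, PySem.Set.empty]
  rw [pv_loopA, pv_pick_eq _ _ (by simp)]
  refine congrArg (fun l => (List.foldl PySem.Set.add [] l).take 5) ?_
  simp only [pv_if_append]
  have hself : ((PySem.Dict.mk tags).insert "@amenity" amenity).get? "@amenity" = some amenity :=
    PySem.Dict.get?_insert_self _ _ _
  have h1 : ((PySem.Dict.mk tags).insert "@amenity" amenity).get? "outdoor_seating" = (PySem.Dict.mk tags).get? "outdoor_seating" :=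
    PySem.Dict.get?_insert_of_ne _ _ (by decide)
  have h2 : ((PySem.Dict.mk tags).insert "@amenity" amenity).get? "takeaway" = (PySem.Dict.mk tags).get? "takeaway" :=
    PySem.Dict.get?_insert_of_ne _ _ (by decide)
  have h3 : ((PySem.Dict.mk tags).insert "@amenity" amenity).get? "delivery" = (PySem.Dict.mk tags).get? "delivery" :=
    PySem.Dict.get?_insert_of_ne _ _ (by decide)
  have h4 : ((PySem.Dict.mk tags).insert "@amenity" amenity).get? "internet_access" = (PySem.Dict.mk tags).get? "internet_access" :=
    PySem.Dict.get?_insert_of_ne _ _ (by decide)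
  have h5 : ((PySem.Dict.mk tags).insert "@amenity" amenity).get? "reservation" = (PySem.Dict.mk tags).get? "reservation" :=
    PySem.Dict.get?_insert_of_ne _ _ (by decide)
  have h6 : ((PySem.Dict.mk tags).insert "@amenity" amenity).get? "organic" = (PySem.Dict.mk tags).get? "organic" :=
    PySem.Dict.get?_insert_of_ne _ _ (by decide)
  simp only [pvRules, List.flatMap_cons, List.flatMap_nil,
    hself, h1, h2, h3, h4, h5, h6, pv_any_two,
    List.any_cons, List.any_nil, Bool.or_false, Bool.or_assoc, Option.any_some,
    List.append_assoc, List.nil_append, List.append_nil, pv_contains_one, pv_any_beq]
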